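-- pv_equiv track=rewrite | github.com/EliasAroni2000/automatas | Aroni-tp1-v2.py | tokenCierraParentesis
-- ===== SOURCE A (Python) =====
-- estado_final = "estado final"
--
-- estadoNoFinal = "estado no aceptado"
--
-- estadoTrampa = "estado trampa"
--
-- def tokenCierraParentesis(lexema):
--     estado = 0
--     estadoFinal = [1]
--     caracter = {0:{')':1},1:{}}
--     for c in lexema:
--         if c in caracter[estado]:
--             estado = caracter[estado][c]
--         else:
--             estado = -1
--             break
--     if estado == -1:
--         return estadoTrampa
--     if estado in estadoFinal:
--         return estado_final
--     else:
--         return estadoNoFinal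
-- ===== SOURCE B (Python) =====
-- estado_final = "estado final"
--
-- estadoNoFinal = "estado no aceptado"
--
-- estadoTrampa = "estado trampa"
--
-- def tokenCierraParentesis(lexema):
--     it = iter(lexema)
--     try:
--         first = next(it)
--     except StopIteration:
--         return estadoNoFinal
--     if first != ')':
--         return estadoTrampa
--     try:
--         next(it)
--     except StopIteration:
--         return estado_final
--     return estadoTrampa
-- ===== Notes on version B (the rewrite author's own statement) =====
-- stated objective: simpler
-- what changed: Replaced the DFA state/transition-table loop by direct iterator inspection: take the first element (empty string rejects as non-final), reject anything whose first character is not the closing parenthesis, then accept exactly when there is no second element.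
import Mathlib
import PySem

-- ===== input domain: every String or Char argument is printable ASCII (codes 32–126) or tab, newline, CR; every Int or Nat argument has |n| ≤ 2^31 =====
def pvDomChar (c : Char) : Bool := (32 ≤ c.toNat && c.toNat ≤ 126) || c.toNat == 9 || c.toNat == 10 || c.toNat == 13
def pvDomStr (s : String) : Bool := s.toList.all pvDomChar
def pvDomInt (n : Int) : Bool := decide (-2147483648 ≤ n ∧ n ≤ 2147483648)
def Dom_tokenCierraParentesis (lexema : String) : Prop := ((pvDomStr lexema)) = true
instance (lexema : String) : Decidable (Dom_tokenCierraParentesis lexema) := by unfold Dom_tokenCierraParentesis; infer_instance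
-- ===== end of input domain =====

-- B drops the DFA state/transition-table loop and classifies the input by inspecting
-- its first (and possible second) element directly; objective: simpler.


-- ===== PORT A =====
-- the dict-of-dicts transition table, transliterated
def pvTableA : PySem.Dict Int (PySem.Dict Char Int) :=
  (PySem.Dict.empty.insert 0 ((PySem.Dict.empty.insert ')' 1))).insert 1 PySem.Dict.empty

-- the for-loop with its break: returns the final 'estado'
def pvLoopA : Int → List Char → Int
  | estado, [] => estado
  | estado, c :: rest =>
    match (pvTableA.getD estado PySem.Dict.empty).get? c with
    | some v => pvLoopA v rest
    | none => -1          -- estado = -1; break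

def tokenCierraParentesis (lexema : String) : String :=
  let estado : Int := pvLoopA 0 lexema.toList
  let estadoFinal : List Int := [1]
  if estado == -1 then "estado trampa"
  else if estado ∈ estadoFinal then "estado final"
  else "estado no aceptado"

-- ===== PORT B =====
def tokenCierraParentesis_alt (lexema : String) : String :=
  match lexema.toList with
  | [] => "estado no aceptado"                 -- next(it) raises at once
  | first :: rest =>
    if first ≠ ')' then "estado trampa"
    else match rest with
      | [] => "estado final"                   -- second next(it) raises
      | _ :: _ => "estado trampa"

-- ===== PRECONDITION & SPEC =====
def Spec_tokenCierraParentesis (lexema : String) (out : String) : Prop := out = tokenCierraParentesis_alt lexema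
instance (lexema : String) (out : String) : Decidable (Spec_tokenCierraParentesis lexema out) := by unfold Spec_tokenCierraParentesis; infer_instance

-- ===== CLAIM (what is proved, stated in full; the proofs are below) =====
def Claim_equal_tokenCierraParentesis : Prop := ∀ (lexema : String), Dom_tokenCierraParentesis lexema → Spec_tokenCierraParentesis lexema (tokenCierraParentesis lexema)

-- ===== LEMMAS AND PROOFS =====
-- from state 1 (no transitions), any nonempty tail traps
theorem pvLoopA_one (l : List Char) (h : l ≠ []) : pvLoopA 1 l = -1 := by
  cases l with
  | nil => exact absurd rfl h
  | cons c rest => simp [pvLoopA, pvTableA, PySem.Dict.getD, PySem.Dict.get?, PySem.Dict.insert, PySem.Dict.empty]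

-- ===== VERDICT (by name: the statement is the Claim_ definition above) =====
theorem tokenCierraParentesis_spec : Claim_equal_tokenCierraParentesis := by
  intro lexema _
  unfold Spec_tokenCierraParentesis tokenCierraParentesis tokenCierraParentesis_alt
  cases h : lexema.toList with
  | nil => simp [pvLoopA]
  | cons first rest =>
    by_cases hf : first = ')'
    · subst hf
      cases rest with
      | nil => simp [pvLoopA, pvTableA, PySem.Dict.getD, PySem.Dict.get?, PySem.Dict.insert, PySem.Dict.empty]
      | cons c2 r2 =>
        have := pvLoopA_one (c2 :: r2) (by simp)
        simp [pvLoopA, pvTableA, PySem.Dict.getD, PySem.Dict.get?, PySem.Dict.insert, PySem.Dict.empty]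
    · have : (pvTableA.getD 0 PySem.Dict.empty).get? first = none := by
        simp [pvTableA, PySem.Dict.getD, PySem.Dict.get?, PySem.Dict.insert, PySem.Dict.empty, Ne.symm hf]
      simp [pvLoopA, this, hf]
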